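-- pv_equiv track=rewrite | github.com/vimturtle/solutions | 6-0002-fall-2016/ps1/ps1b.py | format_comb
-- ===== SOURCE A (Python) =====
-- def format_comb(comb):
--     """
--     >>> format_comb([25, 10, 25, 1, 10, 1, 10])
--     2 * 25 + 3 * 10 + 2 * 1 = 82
--     """
--
--     counts = {}
--     for i in sorted(comb, reverse=True):
--         counts[i] = counts.get(i, 0) + 1
--
--     t = ""
--     for k, v in counts.items():
--         if v != 0:
--             t += f"{v} * {k} + "
--
--     return f"{len(comb)} ({t[:-2]}= {sum(comb)})"
-- ===== SOURCE B (Python) =====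
-- def format_comb(comb):
--     s = sorted(comb, reverse=True)
--     parts = []
--     i = 0
--     n = len(s)
--     while i < n:
--         j = i
--         while j < n and s[j] == s[i]:
--             j += 1
--         parts.append(f"{j - i} * {s[i]} + ")
--         i = j
--     return f"{len(comb)} ({''.join(parts)[:-2]}= {sum(comb)})"
-- ===== Notes on version B (the rewrite author's own statement) =====
-- stated objective: alternative
-- what changed: Replaces the dict accumulation over the sorted list (and the later items() pass with its v != 0 guard) by direct run-length grouping of the descending-sorted list, emitting each term as soon as its run ends.
import Mathlib
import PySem

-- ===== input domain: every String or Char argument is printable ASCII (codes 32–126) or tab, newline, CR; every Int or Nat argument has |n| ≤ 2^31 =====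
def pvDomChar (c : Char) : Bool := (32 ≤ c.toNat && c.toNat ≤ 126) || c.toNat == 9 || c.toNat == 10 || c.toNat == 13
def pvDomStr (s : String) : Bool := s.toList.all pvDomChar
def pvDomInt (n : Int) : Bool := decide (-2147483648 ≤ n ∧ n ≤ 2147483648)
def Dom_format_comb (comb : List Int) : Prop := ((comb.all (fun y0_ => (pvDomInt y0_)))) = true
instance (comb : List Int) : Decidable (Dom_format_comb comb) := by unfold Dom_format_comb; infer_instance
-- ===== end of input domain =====

-- B replaces A's dict accumulation + items() pass by run-length grouping of the
-- descending-sorted list (alternative decomposition, same asymptotic cost).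

-- ===== PORT A =====
def format_comb (comb : List Int) : String :=
  let counts := (PySem.List.sorted comb (fun x => x) true).foldl
      (fun d i => d.insert i (d.getD i 0 + 1)) PySem.Dict.empty
  let t := counts.items.foldl
      (fun t kv => if kv.2 ≠ 0 then
          t ++ (PySem.Int.toStr kv.2 ++ " * " ++ PySem.Int.toStr kv.1 ++ " + ")
        else t) ""
  PySem.Int.toStr (comb.length : Int) ++ " (" ++ PySem.Str.slice t none (some (-2))
    ++ "= " ++ PySem.Int.toStr (comb.foldl (· + ·) 0) ++ ")"

-- ===== PORT B =====
-- run-length grouping of a list: one fragment per maximal run (Source B's while loops)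
def groupParts : List Int → List String
  | [] => []
  | x :: xs =>
    (PySem.Int.toStr (1 + ((xs.takeWhile (· == x)).length : Int)) ++ " * "
        ++ PySem.Int.toStr x ++ " + ")
      :: groupParts (xs.dropWhile (· == x))
termination_by l => l.length
decreasing_by
  exact Nat.lt_succ_of_le (List.length_dropWhile_le _ _)

def format_comb_alt (comb : List Int) : String :=
  let s := PySem.List.sorted comb (fun x => x) true
  let t := PySem.Str.join "" (groupParts s)
  PySem.Int.toStr (comb.length : Int) ++ " (" ++ PySem.Str.slice t none (some (-2))
    ++ "= " ++ PySem.Int.toStr (comb.foldl (· + ·) 0) ++ ")"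

-- ===== PRECONDITION & SPEC =====
def Spec_format_comb (comb : List Int) (out : String) : Prop := out = format_comb_alt comb
instance (comb : List Int) (out : String) : Decidable (Spec_format_comb comb out) := by unfold Spec_format_comb; infer_instance

-- ===== CLAIM (what is proved, stated in full; the proofs are below) =====
def Claim_equal_format_comb : Prop := ∀ (comb : List Int), Dom_format_comb comb → Spec_format_comb comb (format_comb comb)

-- ===== LEMMAS AND PROOFS =====

-- run pairs (value, run length) of a list, in order
def runPairs : List Int → List (Int × Int)
  | [] => []
  | x :: xs =>
    (x, 1 + ((xs.takeWhile (· == x)).length : Int)) :: runPairs (xs.dropWhile (· == x))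
termination_by l => l.length
decreasing_by
  exact Nat.lt_succ_of_le (List.length_dropWhile_le _ _)

lemma runPairs_nil : runPairs [] = [] := by
  rw [runPairs.eq_def]

lemma runPairs_cons (x : Int) (xs : List Int) :
    runPairs (x :: xs)
      = (x, 1 + ((xs.takeWhile (· == x)).length : Int)) :: runPairs (xs.dropWhile (· == x)) := by
  rw [runPairs.eq_def]

lemma join_empty_cons (a : String) (l : List String) :
    PySem.Str.join "" (a :: l) = a ++ PySem.Str.join "" l := by
  apply String.toList_inj.mp
  cases l <;> simp [PySem.Str.join, PySem.Chars.join, List.intercalate]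

lemma str_append_assoc (a b c : String) : (a ++ b) ++ c = a ++ (b ++ c) := by
  apply String.toList_inj.mp; simp

lemma str_empty_append (a : String) : "" ++ a = a := by
  apply String.toList_inj.mp; simp

lemma groupParts_eq_map (l : List Int) :
    groupParts l = (runPairs l).map
      (fun kv => PySem.Int.toStr kv.2 ++ " * " ++ PySem.Int.toStr kv.1 ++ " + ") := by
  fun_induction groupParts l with
  | case1 => rw [runPairs_nil]; rfl
  | case2 x xs ih => rw [runPairs_cons, List.map_cons, ih]

lemma runPairs_pos (l : List Int) : ∀ p ∈ runPairs l, p.2 ≠ 0 := by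
  fun_induction runPairs l with
  | case1 => intro p hp; simp at hp
  | case2 x xs ih =>
    intro p hp
    rcases List.mem_cons.mp hp with h | h
    · subst h; simp; omega
    · exact ih p h

-- folding the run of equal elements into the dict
lemma run_fold (run : List Int) (x : Int) :
    ∀ (c : Int) (d : PySem.Dict Int Int), (∀ y ∈ run, y = x) →
    run.foldl (fun d i => d.insert i (d.getD i 0 + 1)) (d.insert x c)
      = d.insert x (c + (run.length : Int)) := by
  induction run with
  | nil => intro c d _; simp
  | cons y run ih =>
    intro c d hall
    have hy : y = x := hall y (List.mem_cons_self)
    subst hy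
    have step : (d.insert y c).insert y ((d.insert y c).getD y 0 + 1) = d.insert y (c + 1) := by
      rw [PySem.Dict.getD_insert_self, PySem.Dict.insert_insert_self]
    rw [List.foldl_cons]
    simp only [step]
    rw [ih (c + 1) d (fun z hz => hall z (List.mem_cons_of_mem _ hz))]
    congr 1
    simp only [List.length_cons]
    push_cast
    omega

lemma ne_of_mem_dropWhile_desc (x : Int) (xs : List Int)
    (hp : xs.Pairwise (fun a b => b ≤ a)) (hle : ∀ y ∈ xs, y ≤ x) :
    ∀ y ∈ xs.dropWhile (· == x), y ≠ x := by
  intro y hy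
  rcases hrest : xs.dropWhile (· == x) with _ | ⟨h, t⟩
  · rw [hrest] at hy; simp at hy
  · have hne : ¬ (xs.dropWhile (· == x) = []) := by rw [hrest]; simp
    have hh0 := List.head_dropWhile_not (fun y => y == x) hne
    simp only [hrest, List.head_cons] at hh0
    have hh : h ≠ x := by simpa using hh0
    have hhx : h < x := lt_of_le_of_ne
      (hle h ((List.dropWhile_sublist _).subset (by rw [hrest]; exact List.mem_cons_self))) hh
    rw [hrest] at hy
    have hpr : (h :: t).Pairwise (fun a b => b ≤ a) := by
      rw [← hrest]; exact List.Pairwise.sublist (List.dropWhile_sublist _) hp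
    rcases List.mem_cons.mp hy with h' | h'
    · subst h'; exact ne_of_lt hhx
    · have : y ≤ h := (List.pairwise_cons.mp hpr).1 y h'
      exact ne_of_lt (lt_of_le_of_lt this hhx)

lemma counter_items_desc (n : Nat) : ∀ (l : List Int), l.length ≤ n →
    l.Pairwise (fun a b => b ≤ a) →
    ∀ (d : PySem.Dict Int Int), (∀ y ∈ l, d.contains y = false) →
    (l.foldl (fun d i => d.insert i (d.getD i 0 + 1)) d).items
      = d.items ++ runPairs l := by
  induction n with
  | zero =>
    intro l hl _ d _
    have : l = [] := List.length_eq_zero_iff.mp (Nat.le_zero.mp hl)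
    subst this; simp [runPairs_nil]
  | succ n ih =>
    intro l hl hpair d hcont
    cases l with
    | nil => simp [runPairs_nil]
    | cons x xs =>
      have hx0 : d.getD x 0 = 0 :=
        PySem.Dict.getD_of_not_contains _ _ (hcont x List.mem_cons_self)
      have hxs : xs.Pairwise (fun a b => b ≤ a) := (List.pairwise_cons.mp hpair).2
      have hle : ∀ y ∈ xs, y ≤ x := (List.pairwise_cons.mp hpair).1
      rw [List.foldl_cons, hx0]
      have hsplit : ∀ (D : PySem.Dict Int Int),
          xs.foldl (fun d i => d.insert i (d.getD i 0 + 1)) D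
            = (xs.dropWhile (· == x)).foldl (fun d i => d.insert i (d.getD i 0 + 1))
                ((xs.takeWhile (· == x)).foldl (fun d i => d.insert i (d.getD i 0 + 1)) D) := by
        intro D
        conv_lhs => rw [← List.takeWhile_append_dropWhile (p := (· == x)) (l := xs)]
        rw [List.foldl_append]
      rw [hsplit]
      have hrun : ∀ y ∈ xs.takeWhile (· == x), y = x := by
        intro y hy
        have := List.mem_takeWhile_imp hy
        simpa using this
      rw [run_fold _ x (0 + 1) d hrun]
      have hne : ∀ y ∈ xs.dropWhile (· == x), y ≠ x :=
        ne_of_mem_dropWhile_desc x xs hxs hle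
      have hcont' : ∀ y ∈ xs.dropWhile (· == x),
          (d.insert x (0 + 1 + ((xs.takeWhile (· == x)).length : Int))).contains y = false := by
        intro y hy
        rw [PySem.Dict.contains_insert]
        have h1 : (y == x) = false := by simp [hne y hy]
        have h2 : d.contains y = false :=
          hcont y (List.mem_cons_of_mem _ ((List.dropWhile_sublist _).subset hy))
        rw [h1, h2]
        rfl
      have hlen : (xs.dropWhile (· == x)).length ≤ n := by
        have h1 := List.length_dropWhile_le (· == x) xs
        simp at hl
        omega
      have hpr : (xs.dropWhile (· == x)).Pairwise (fun a b => b ≤ a) :=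
        List.Pairwise.sublist (List.dropWhile_sublist _) hxs
      rw [ih _ hlen hpr _ hcont']
      rw [PySem.Dict.items_insert_of_not_contains _ _ (hcont x List.mem_cons_self)]
      rw [runPairs_cons, List.append_assoc]
      norm_num

lemma fold_frag (ps : List (Int × Int)) :
    ∀ acc : String, (∀ p ∈ ps, p.2 ≠ 0) →
    ps.foldl (fun t kv => if kv.2 ≠ 0 then
        t ++ (PySem.Int.toStr kv.2 ++ " * " ++ PySem.Int.toStr kv.1 ++ " + ")
      else t) acc
      = acc ++ PySem.Str.join ""
          (ps.map (fun kv => PySem.Int.toStr kv.2 ++ " * " ++ PySem.Int.toStr kv.1 ++ " + ")) := by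
  induction ps with
  | nil =>
    intro acc _
    apply String.toList_inj.mp
    simp [PySem.Str.join, PySem.Chars.join, List.intercalate]
  | cons p ps ih =>
    intro acc hpos
    rw [List.foldl_cons, if_pos (hpos p List.mem_cons_self), List.map_cons, join_empty_cons]
    rw [ih _ (fun q hq => hpos q (List.mem_cons_of_mem _ hq))]
    rw [str_append_assoc]

-- ===== VERDICT (by name: the statement is the Claim_ definition above) =====
theorem format_comb_spec : Claim_equal_format_comb := by
  intro comb _
  unfold Spec_format_comb format_comb format_comb_alt
  have hitems := counter_items_desc (PySem.List.sorted comb (fun x => x) true).length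
    (PySem.List.sorted comb (fun x => x) true) le_rfl
    (PySem.List.sorted_pairwise_rev comb (fun x => x))
    PySem.Dict.empty (fun y _ => PySem.Dict.contains_empty y)
  simp only [hitems]
  have hempty : (PySem.Dict.empty : PySem.Dict Int Int).items = [] := rfl
  rw [hempty, List.nil_append]
  rw [fold_frag _ "" (runPairs_pos _), str_empty_append, groupParts_eq_map]
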